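-- pv_equiv track=rewrite | github.com/cristianoritta/tracevirtus_sso | utils/telegram.py | dividir_mensagem
-- ===== SOURCE A (Python) =====
-- def dividir_mensagem(mensagem: str, tamanho_maximo: int = 3000) -> list:
--     """
--     Divide uma mensagem longa em partes menores.
--
--     Args:
--         mensagem (str): A mensagem a ser dividida.
--         tamanho_maximo (int): Tamanho máximo de cada parte (padrão: 3000).
--
--     Returns:
--         list: Lista contendo as partes da mensagem.
--     """
--     tamanho_efetivo = tamanho_maximo - 20
--     blocos = mensagem.split('\n\n')
--     partes = []
--     parte_atual = ""
--
--     for bloco in blocos: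
--         if len(bloco) > tamanho_efetivo:
--             if parte_atual:
--                 partes.append(parte_atual)
--                 parte_atual = ""
--
--             linhas = bloco.split('\n')
--             linha_atual = ""
--
--             for linha in linhas:
--                 if len(linha) > tamanho_efetivo:
--                     if linha_atual:
--                         partes.append(linha_atual)
--                         linha_atual = ""
--
--                     for i in range(0, len(linha), tamanho_efetivo):
--                         partes.append(linha[i:i + tamanho_efetivo])
--                 elif len(linha_atual) + len(linha) + (1 if linha_atual else 0) > tamanho_efetivo:
--                     partes.append(linha_atual)
--                     linha_atual = linha
--                 else:
--                     if linha_atual: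
--                         linha_atual += '\n' + linha
--                     else:
--                         linha_atual = linha
--
--             if linha_atual:
--                 partes.append(linha_atual)
--
--         elif len(parte_atual) + len(bloco) + (2 if parte_atual else 0) > tamanho_efetivo:
--             partes.append(parte_atual)
--             parte_atual = bloco
--         else:
--             if parte_atual:
--                 parte_atual += '\n\n' + bloco
--             else:
--                 parte_atual = bloco
--
--     if parte_atual:
--         partes.append(parte_atual)
--
--     return partes
-- ===== SOURCE B (Python) =====
-- def dividir_mensagem(mensagem: str, tamanho_maximo: int = 3000) -> list:
--     """Divide uma mensagem longa em partes menores.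
--
--     Two staged passes: first tokenize the message into a flat event stream
--     (FLUSH markers, forced EMIT chunks, packable tokens with their separator),
--     then a single linear fold packs the stream with one accumulator.
--     """
--     eff = tamanho_maximo - 20
--     FLUSH, EMIT, TOK_LINE, TOK_BLOCK = 0, 1, 2, 3
--
--     # stage 1: flatten into events
--     eventos = []
--     for bloco in mensagem.split('\n\n'):
--         if len(bloco) > eff:
--             eventos.append((FLUSH, ''))
--             for linha in bloco.split('\n'):
--                 if len(linha) > eff:
--                     eventos.append((FLUSH, ''))
--                     for i in range(0, len(linha), eff):
--                         eventos.append((EMIT, linha[i:i + eff]))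
--                 else:
--                     eventos.append((TOK_LINE, linha))
--             eventos.append((FLUSH, ''))
--         else:
--             eventos.append((TOK_BLOCK, bloco))
--
--     # stage 2: one linear packing pass
--     partes, cur = [], ""
--     for tag, txt in eventos:
--         if tag == FLUSH:
--             if cur:
--                 partes.append(cur)
--                 cur = ""
--         elif tag == EMIT:
--             partes.append(txt)
--         else:
--             sep = '\n' if tag == TOK_LINE else '\n\n'
--             if len(cur) + len(txt) + (len(sep) if cur else 0) > eff:
--                 partes.append(cur)
--                 cur = txt
--             else:
--                 cur = cur + sep + txt if cur else txt
--     if cur: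
--         partes.append(cur)
--     return partes
-- ===== Notes on version B (the rewrite author's own statement) =====
-- stated objective: alternative
-- what changed: A's triple-nested loops with two interleaved accumulators are replaced by two staged passes: a tokenizer flattens the message into one event stream (flush markers, forced-emit chunks, packable tokens tagged with their separator), and a single linear fold with one accumulator then packs that stream.
import Mathlib
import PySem

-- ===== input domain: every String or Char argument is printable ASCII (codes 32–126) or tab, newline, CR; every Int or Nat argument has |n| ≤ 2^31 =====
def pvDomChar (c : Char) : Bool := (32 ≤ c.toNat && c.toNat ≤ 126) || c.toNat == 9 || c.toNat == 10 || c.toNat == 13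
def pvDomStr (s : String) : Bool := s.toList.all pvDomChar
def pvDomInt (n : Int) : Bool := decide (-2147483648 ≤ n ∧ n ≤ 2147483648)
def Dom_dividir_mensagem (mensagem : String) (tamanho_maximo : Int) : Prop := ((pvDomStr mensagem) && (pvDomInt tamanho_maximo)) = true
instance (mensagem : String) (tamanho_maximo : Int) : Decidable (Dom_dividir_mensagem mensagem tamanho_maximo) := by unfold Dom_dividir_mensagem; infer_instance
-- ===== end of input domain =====

-- B replaces A's triple-nested loops (two interleaved accumulators) by two staged passes:
-- a tokenizer flattens the message into one flat event stream, and a single linear fold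
-- with one accumulator packs that stream (objective: alternative; same result, same cost).

-- ===== PORT A =====
-- A's inner 'for linha in linhas' loop; state = (partes, linha_atual).
def pvA_linhaStep (te : Int) (st : List (List Char) × List Char) (linha : List Char) :
    List (List Char) × List Char :=
  let partes := st.1
  let linha_atual := st.2
  if (linha.length : Int) > te then
    let partes := if linha_atual ≠ [] then partes ++ [linha_atual] else partes
    let partes := (PySem.List.pyRange 0 (linha.length : Int) te).foldl
      (fun acc i => acc ++ [PySem.List.slice linha (some i) (some (i + te))]) partes
    (partes, [])
  else if (linha_atual.length : Int) + (linha.length : Int) + (if linha_atual ≠ [] then 1 else 0) > te then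
    (partes ++ [linha_atual], linha)
  else
    (partes, if linha_atual ≠ [] then linha_atual ++ '\n' :: linha else linha)

-- A's outer 'for bloco in blocos' loop; state = (partes, parte_atual).
def pvA_blocoStep (te : Int) (st : List (List Char) × List Char) (bloco : List Char) :
    List (List Char) × List Char :=
  let partes := st.1
  let parte_atual := st.2
  if (bloco.length : Int) > te then
    let partes := if parte_atual ≠ [] then partes ++ [parte_atual] else partes
    let linhas := PySem.Chars.splitOn bloco ['\n']
    let st2 := linhas.foldl (pvA_linhaStep te) (partes, [])
    let partes := if st2.2 ≠ [] then st2.1 ++ [st2.2] else st2.1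
    (partes, [])
  else if (parte_atual.length : Int) + (bloco.length : Int) + (if parte_atual ≠ [] then 2 else 0) > te then
    (partes ++ [parte_atual], bloco)
  else
    (partes, if parte_atual ≠ [] then parte_atual ++ '\n' :: '\n' :: bloco else bloco)

def dividir_mensagem (mensagem : String) (tamanho_maximo : Int) : List String :=
  let tamanho_efetivo := tamanho_maximo - 20
  let blocos := PySem.Chars.splitOn mensagem.toList ['\n', '\n']
  let st := blocos.foldl (pvA_blocoStep tamanho_efetivo) ([], [])
  let partes := if st.2 ≠ [] then st.1 ++ [st.2] else st.1
  partes.map (fun l => String.ofList l)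

-- ===== PORT B =====
-- Events: tag 0 = FLUSH, 1 = EMIT chunk, 2 = token with sep '\n', 3 = token with sep '\n\n'.
-- Stage 1, inner 'for linha' loop of the tokenizer (appends events).
def pvB_tokLinhaStep (eff : Int) (ev : List (Nat × List Char)) (linha : List Char) :
    List (Nat × List Char) :=
  if (linha.length : Int) > eff then
    (PySem.List.pyRange 0 (linha.length : Int) eff).foldl
      (fun acc i => acc ++ [(1, PySem.List.slice linha (some i) (some (i + eff)))])
      (ev ++ [(0, [])])
  else ev ++ [(2, linha)]

-- Stage 1, outer 'for bloco' loop of the tokenizer.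
def pvB_tokBlocoStep (eff : Int) (ev : List (Nat × List Char)) (bloco : List Char) :
    List (Nat × List Char) :=
  if (bloco.length : Int) > eff then
    ((PySem.Chars.splitOn bloco ['\n']).foldl (pvB_tokLinhaStep eff) (ev ++ [(0, [])])) ++ [(0, [])]
  else ev ++ [(3, bloco)]

-- Stage 2: the single packing pass; state = (partes, cur).
def pvB_packStep (eff : Int) (st : List (List Char) × List Char) (ev : Nat × List Char) :
    List (List Char) × List Char :=
  let partes := st.1
  let cur := st.2
  if ev.1 == 0 then
    (if cur ≠ [] then partes ++ [cur] else partes, [])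
  else if ev.1 == 1 then
    (partes ++ [ev.2], cur)
  else
    let sep : List Char := if ev.1 == 2 then ['\n'] else ['\n', '\n']
    if (cur.length : Int) + (ev.2.length : Int) + (if cur ≠ [] then (sep.length : Int) else 0) > eff then
      (partes ++ [cur], ev.2)
    else
      (partes, if cur ≠ [] then cur ++ sep ++ ev.2 else ev.2)

def dividir_mensagem_alt (mensagem : String) (tamanho_maximo : Int) : List String :=
  let eff := tamanho_maximo - 20
  let eventos := (PySem.Chars.splitOn mensagem.toList ['\n', '\n']).foldl (pvB_tokBlocoStep eff) []
  let st := eventos.foldl (pvB_packStep eff) ([], [])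
  let partes := if st.2 ≠ [] then st.1 ++ [st.2] else st.1
  partes.map (fun l => String.ofList l)

-- ===== PRECONDITION & SPEC =====
-- Pre_ excludes exactly the inputs where A raises ValueError: tamanho_maximo = 20 makes the chunking
-- step range(0, len(linha), 0) a zero-step range, reached as soon as some line is nonempty
-- (i.e. the message has a character other than '\n').  B raises there too.
def Pre_dividir_mensagem (mensagem : String) (tamanho_maximo : Int) : Prop :=
  tamanho_maximo ≠ 20 ∨ mensagem.toList.all (· = '\n') = true
instance (mensagem : String) (tamanho_maximo : Int) : Decidable (Pre_dividir_mensagem mensagem tamanho_maximo) := by unfold Pre_dividir_mensagem; infer_instance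

def pvWitness_dividir_mensagem : String × Int := ("ab\ncd\n\nefg", 25)

def Spec_dividir_mensagem (mensagem : String) (tamanho_maximo : Int) (out : List String) : Prop := out = dividir_mensagem_alt mensagem tamanho_maximo
instance (mensagem : String) (tamanho_maximo : Int) (out : List String) : Decidable (Spec_dividir_mensagem mensagem tamanho_maximo out) := by unfold Spec_dividir_mensagem; infer_instance

-- ===== CLAIM =====
def Claim_equal_dividir_mensagem : Prop := ∀ (mensagem : String) (tamanho_maximo : Int), Dom_dividir_mensagem mensagem tamanho_maximo → Pre_dividir_mensagem mensagem tamanho_maximo → Spec_dividir_mensagem mensagem tamanho_maximo (dividir_mensagem mensagem tamanho_maximo)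

-- ===== LEMMAS AND PROOFS =====

-- The flat list of events the tokenizer appends for one line / one block.
def pvEvLinha (eff : Int) (linha : List Char) : List (Nat × List Char) :=
  if (linha.length : Int) > eff then
    (0, []) :: (PySem.List.pyRange 0 (linha.length : Int) eff).map
      (fun i => (1, PySem.List.slice linha (some i) (some (i + eff))))
  else [(2, linha)]

def pvEvBloco (eff : Int) (bloco : List Char) : List (Nat × List Char) :=
  if (bloco.length : Int) > eff then
    (0, []) :: ((PySem.Chars.splitOn bloco ['\n']).flatMap (pvEvLinha eff)) ++ [(0, [])]
  else [(3, bloco)]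

theorem pvB_tokLinhaStep_eq (eff : Int) (ev : List (Nat × List Char)) (linha : List Char) :
    pvB_tokLinhaStep eff ev linha = ev ++ pvEvLinha eff linha := by
  simp only [pvB_tokLinhaStep, pvEvLinha]
  split_ifs with h
  · rw [PySem.List.foldl_append_singleton_eq_map]; simp
  · rfl

theorem pvB_tokBlocoStep_eq (eff : Int) (ev : List (Nat × List Char)) (bloco : List Char) :
    pvB_tokBlocoStep eff ev bloco = ev ++ pvEvBloco eff bloco := by
  simp only [pvB_tokBlocoStep, pvEvBloco]
  split_ifs with h
  · rw [PySem.List.foldl_congr_mem _ _ _ _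
      (fun acc x _ => pvB_tokLinhaStep_eq eff acc x),
      PySem.List.foldl_append_eq_flatMap]
    simp
  · rfl

-- A fold over a flatMap is the fold of the inner folds.
theorem pv_foldl_flatMap {α β γ : Type} (g : β → List γ) (f : α → γ → α) :
    ∀ (l : List β) (init : α),
      (l.flatMap g).foldl f init = l.foldl (fun a b => (g b).foldl f a) init := by
  intro l
  induction l with
  | nil => intro init; rfl
  | cons x t ih => intro init; simp [List.foldl_append, ih]

-- Packing the events of one line equals A's inner line step.
theorem pv_pack_linha (eff : Int) (st : List (List Char) × List Char) (linha : List Char) :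
    (pvEvLinha eff linha).foldl (pvB_packStep eff) st = pvA_linhaStep eff st linha := by
  rcases st with ⟨partes, cur⟩
  by_cases h : (linha.length : Int) > eff
  · simp only [pvEvLinha, if_pos h, pvA_linhaStep]
    simp only [List.foldl_cons, List.foldl_map]
    have hstep : ∀ (s : List (List Char) × List Char) (i : Int),
        pvB_packStep eff s (1, PySem.List.slice linha (some i) (some (i + eff)))
          = (s.1 ++ [PySem.List.slice linha (some i) (some (i + eff))], s.2) := by
      intro s i; simp [pvB_packStep]
    rw [PySem.List.foldl_congr_mem _ _ _ _ (fun acc x _ => hstep acc x)]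
    rw [PySem.List.foldl_prod_mk
      (f := fun acc i => acc ++ [PySem.List.slice linha (some i) (some (i + eff))])
      (g := fun acc _ => acc)]
    rw [PySem.List.foldl_append_singleton_eq_map, PySem.List.foldl_append_singleton_eq_map,
      PySem.List.foldl_ignore]
    have hflush : pvB_packStep eff (partes, cur) (0, [])
        = ((if cur ≠ [] then partes ++ [cur] else partes), []) := by
      simp [pvB_packStep]
    rw [hflush]
  · simp only [pvEvLinha, pvA_linhaStep, if_neg h]
    simp only [List.foldl_cons, List.foldl_nil, pvB_packStep]
    norm_num

-- Packing the events of one block equals A's outer block step.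
theorem pv_pack_bloco (eff : Int) (st : List (List Char) × List Char) (bloco : List Char) :
    (pvEvBloco eff bloco).foldl (pvB_packStep eff) st = pvA_blocoStep eff st bloco := by
  rcases st with ⟨partes, cur⟩
  by_cases h : (bloco.length : Int) > eff
  · simp only [pvEvBloco, pvA_blocoStep, if_pos h]
    simp only [List.foldl_cons, List.foldl_append, List.foldl_nil]
    rw [pv_foldl_flatMap,
      PySem.List.foldl_congr_mem _ _ _ _ (fun acc x _ => pv_pack_linha eff acc x)]
    have hflush : pvB_packStep eff (partes, cur) (0, [])
        = ((if cur ≠ [] then partes ++ [cur] else partes), []) := by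
      simp [pvB_packStep]
    rw [hflush]
    set st2 := (PySem.Chars.splitOn bloco ['\n']).foldl (pvA_linhaStep eff)
      ((if cur ≠ [] then partes ++ [cur] else partes), []) with hst2
    simp [pvB_packStep]
  · simp only [pvEvBloco, pvA_blocoStep, if_neg h]
    simp only [List.foldl_cons, List.foldl_nil, pvB_packStep]
    norm_num

theorem pvA_eq_pvB (mensagem : String) (tamanho_maximo : Int) :
    dividir_mensagem mensagem tamanho_maximo = dividir_mensagem_alt mensagem tamanho_maximo := by
  simp only [dividir_mensagem, dividir_mensagem_alt]
  rw [PySem.List.foldl_congr_mem _ _ _ _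
      (fun acc x _ => pvB_tokBlocoStep_eq (tamanho_maximo - 20) acc x),
    PySem.List.foldl_append_eq_flatMap, List.nil_append, pv_foldl_flatMap,
    PySem.List.foldl_congr_mem _ _ _ _
      (fun acc x _ => pv_pack_bloco (tamanho_maximo - 20) acc x)]

-- ===== VERDICT =====
theorem dividir_mensagem_spec : Claim_equal_dividir_mensagem := by
  intro mensagem tamanho_maximo _ _
  exact pvA_eq_pvB mensagem tamanho_maximo
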